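-- pv_equiv track=rewrite | github.com/sipthesquares/Stargazer-numerology | stargazer_numerology_v2.py | pythagorean_value
-- ===== SOURCE A (Python) =====
-- def pythagorean_value(name):
--     chart = {
--         **dict.fromkeys(list("AJS"), 1),
--         **dict.fromkeys(list("BKT"), 2),
--         **dict.fromkeys(list("CLU"), 3),
--         **dict.fromkeys(list("DMV"), 4),
--         **dict.fromkeys(list("ENW"), 5),
--         **dict.fromkeys(list("FOX"), 6),
--         **dict.fromkeys(list("GPY"), 7),
--         **dict.fromkeys(list("HQZ"), 8),
--         **dict.fromkeys(list("IR"),  9),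
--     }
--     return sum(chart.get(c.upper(), 0) for c in name if c.isalpha())
-- ===== SOURCE B (Python) =====
-- def pythagorean_value(name):
--     counts = [0] * 26
--     for c in name:
--         if c.isascii() and c.isalpha():
--             counts[ord(c.upper()) - 65] += 1
--     return sum((i % 9 + 1) * counts[i] for i in range(26))
-- ===== Notes on version B (the rewrite author's own statement) =====
-- stated objective: alternative
-- what changed: Replaces the per-character dict lookup summed in one generator with two stages: a single pass builds a 26-bin letter-frequency histogram (indexed by ord(c.upper())-65 after an ASCII check), then the result is the dot product of the histogram with the closed-form value table (i % 9 + 1) over the 26 bins.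
import Mathlib
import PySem

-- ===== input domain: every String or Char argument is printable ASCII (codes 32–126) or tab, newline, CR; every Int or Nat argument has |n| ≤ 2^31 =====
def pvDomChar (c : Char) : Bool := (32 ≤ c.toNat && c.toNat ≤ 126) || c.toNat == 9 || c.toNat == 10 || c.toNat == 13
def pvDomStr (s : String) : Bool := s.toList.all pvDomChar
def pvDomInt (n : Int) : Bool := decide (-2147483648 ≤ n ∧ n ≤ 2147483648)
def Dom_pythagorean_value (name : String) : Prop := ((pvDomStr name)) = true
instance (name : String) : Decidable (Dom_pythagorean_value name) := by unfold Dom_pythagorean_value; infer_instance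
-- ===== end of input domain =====

-- B replaces A's per-character dict lookup + generator-sum with two stages: a 26-bin
-- letter histogram built in one pass, then the dot product with the value table (alternative).


-- ===== PORT A =====
-- **dict.fromkeys(list s, v): insert every character of s with value v, in order
def pvFromkeys (d : PySem.Dict Char Int) (s : String) (v : Int) : PySem.Dict Char Int :=
  s.toList.foldl (fun d c => d.insert c v) d

def pvChart : PySem.Dict Char Int :=
  pvFromkeys (pvFromkeys (pvFromkeys (pvFromkeys (pvFromkeys (pvFromkeys (pvFromkeys
    (pvFromkeys (pvFromkeys PySem.Dict.empty "AJS" 1) "BKT" 2) "CLU" 3) "DMV" 4)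
    "ENW" 5) "FOX" 6) "GPY" 7) "HQZ" 8) "IR" 9

def pythagorean_value (name : String) : Int :=
  (((name.toList.filter (fun c => PySem.Chars.isalpha c)).map
    (fun c => pvChart.getD (PySem.Chars.upperChar c) 0))).sum

-- ===== PORT B =====
-- c.isascii() ported by hand as c.toNat ≤ 127 (exact: Python isascii ⇔ ord(c) < 128)
def pythagorean_value_alt (name : String) : Int :=
  let counts := name.toList.foldl
    (fun counts c =>
      if c.toNat ≤ 127 ∧ PySem.Chars.isalpha c = true then
        counts.set ((PySem.Chars.upperChar c).toNat - 65)
          (counts.getD ((PySem.Chars.upperChar c).toNat - 65) 0 + 1)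
      else counts)
    (List.replicate 26 (0 : Int))
  (PySem.List.pyRange 0 26 1).foldl
    (fun s i => s + (PySem.Int.mod i 9 + 1) * counts.getD i.toNat 0) 0

-- ===== PRECONDITION & SPEC =====
def Spec_pythagorean_value (name : String) (out : Int) : Prop := out = pythagorean_value_alt name
instance (name : String) (out : Int) : Decidable (Spec_pythagorean_value name out) := by unfold Spec_pythagorean_value; infer_instance

-- ===== CLAIM (what is proved, stated in full; the proofs are below) =====
def Claim_equal_pythagorean_value : Prop := ∀ (name : String), Dom_pythagorean_value name → Spec_pythagorean_value name (pythagorean_value name)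

-- ===== LEMMAS AND PROOFS =====

-- B's histogram update step, named for the proofs (definitionally the step in the port)
def pvBump (counts : List Int) (c : Char) : List Int :=
  if c.toNat ≤ 127 ∧ PySem.Chars.isalpha c = true then
    counts.set ((PySem.Chars.upperChar c).toNat - 65)
      (counts.getD ((PySem.Chars.upperChar c).toNat - 65) 0 + 1)
  else counts

-- B's second stage, named for the proofs (definitionally the second stage of the port)
def pvDot (counts : List Int) : Int :=
  (PySem.List.pyRange 0 26 1).foldl
    (fun s i => s + (PySem.Int.mod i 9 + 1) * counts.getD i.toNat 0) 0

theorem pvAlt_eq (name : String) :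
    pythagorean_value_alt name
      = pvDot (name.toList.foldl pvBump (List.replicate 26 0)) := rfl

theorem pvChart_lookup : ∀ k : Nat, k < 26 →
    pvChart.getD (Char.ofNat (65 + k)) 0 = ((k % 9 : Nat) : Int) + 1 := by decide

theorem pvIsalpha_range (c : Char)
    (h : PySem.Chars.isalpha c = true) :
    (65 ≤ c.toNat ∧ c.toNat ≤ 90) ∨ (97 ≤ c.toNat ∧ c.toNat ≤ 122) := by
  simp only [PySem.Chars.isalpha, PySem.Chars.isupper, PySem.Chars.islower,
    Char.le_def, UInt32.le_iff_toNat_le, Bool.or_eq_true, Bool.and_eq_true,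
    decide_eq_true_eq] at h
  have e : c.toNat = c.val.toNat := rfl
  rw [e]
  have e65 : ('A').val.toNat = 65 := rfl
  have e90 : ('Z').val.toNat = 90 := rfl
  have e97 : ('a').val.toNat = 97 := rfl
  have e122 : ('z').val.toNat = 122 := rfl
  omega

theorem pvUpper_range (c : Char)
    (h : PySem.Chars.isalpha c = true) :
    65 ≤ (PySem.Chars.upperChar c).toNat ∧ (PySem.Chars.upperChar c).toNat ≤ 90 := by
  have hr := pvIsalpha_range c h
  unfold PySem.Chars.upperChar PySem.Chars.islower
  split
  · rename_i hl
    simp only [Bool.and_eq_true, decide_eq_true_eq, Char.le_def,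
      UInt32.le_iff_toNat_le] at hl
    have e : c.toNat = c.val.toNat := rfl
    have e97 : ('a').val.toNat = 97 := rfl
    have e122 : ('z').val.toNat = 122 := rfl
    rw [Char.toNat_ofNat, if_pos]
    · omega
    · exact Or.inl (by omega)
  · rename_i hl
    simp only [Bool.and_eq_true, decide_eq_true_eq, Char.le_def,
      UInt32.le_iff_toNat_le, not_and, not_le] at hl
    have e : c.toNat = c.val.toNat := rfl
    have e97 : ('a').val.toNat = 97 := rfl
    have e122 : ('z').val.toNat = 122 := rfl
    rcases hr with h1 | h1
    · exact h1
    · exfalso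
      have h97 : 97 ≤ c.val.toNat := by omega
      have := hl h97
      omega

-- sum over range n of g = sum of f plus d, when g agrees with f except at u where it is f u + d
theorem pvSum_range_update (n u : Nat) (d : Int) (f g : Nat → Int)
    (hu : u < n) (heq : ∀ i, i ≠ u → g i = f i) (hgu : g u = f u + d) :
    ((List.range n).map g).sum = ((List.range n).map f).sum + d := by
  induction n with
  | zero => omega
  | succ n ih =>
    rw [List.range_succ, List.map_append, List.map_append, List.sum_append, List.sum_append]
    by_cases hn : u = n
    · have hmap : (List.range n).map g = (List.range n).map f := by
        apply List.map_congr_left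
        intro i hi
        exact heq i (by have := List.mem_range.mp hi; omega)
      subst hn
      simp [hmap, hgu]; ring
    · have := ih (by omega)
      have hg : g n = f n := heq n (by omega)
      simp [this, hg]; ring

-- pvDot as a sum over List.range 26
theorem pvDot_eq_sum (counts : List Int) :
    pvDot counts
      = ((List.range 26).map (fun i => (((i % 9 : Nat) : Int) + 1) * counts.getD i 0)).sum := by
  have hrange : PySem.List.pyRange 0 26 1 = List.map (fun n : Nat => (n : Int)) (List.range 26) := by decide
  rw [pvDot, hrange, PySem.List.foldl_add, zero_add, List.map_map]
  apply congrArg List.sum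
  apply List.map_congr_left
  intro i hi
  simp [Function.comp]

-- per alpha character in Dom: one bump moves pvDot by exactly A's chart value
set_option maxRecDepth 4096 in
theorem pvDot_bump (counts : List Int) (hlen : counts.length = 26) (c : Char)
    (hd : pvDomChar c = true) (h : PySem.Chars.isalpha c = true) :
    pvDot (pvBump counts c) = pvDot counts + pvChart.getD (PySem.Chars.upperChar c) 0 := by
  have hur := pvUpper_range c h
  have h127 : c.toNat ≤ 127 := by
    simp only [pvDomChar, Bool.or_eq_true, Bool.and_eq_true, decide_eq_true_eq,
      beq_iff_eq] at hd
    omega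
  have hb : pvBump counts c
      = counts.set ((PySem.Chars.upperChar c).toNat - 65)
          (counts.getD ((PySem.Chars.upperChar c).toNat - 65) 0 + 1) := by
    unfold pvBump
    rw [if_pos ⟨h127, h⟩]
  have hu : (PySem.Chars.upperChar c).toNat - 65 < 26 := by omega
  have hchar : Char.ofNat (65 + ((PySem.Chars.upperChar c).toNat - 65))
      = PySem.Chars.upperChar c := by
    conv_rhs => rw [← Char.ofNat_toNat (PySem.Chars.upperChar c)]
    congr 1
    omega
  have hval : pvChart.getD (PySem.Chars.upperChar c) 0
      = ((((PySem.Chars.upperChar c).toNat - 65) % 9 : Nat) : Int) + 1 := by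
    have hlook := pvChart_lookup ((PySem.Chars.upperChar c).toNat - 65) hu
    rw [hchar] at hlook
    exact hlook
  rw [hb, pvDot_eq_sum, pvDot_eq_sum, hval]
  apply pvSum_range_update 26 ((PySem.Chars.upperChar c).toNat - 65) _ _ _ hu
  · intro i hi
    simp only [List.getD_eq_getElem?_getD]
    rw [List.getElem?_set_ne (by omega)]
  · simp only [List.getD_eq_getElem?_getD]
    rw [List.getElem?_set_self (by omega), Option.getD_some]
    ring

theorem pvBump_length (counts : List Int) (c : Char) :
    (pvBump counts c).length = counts.length := by
  unfold pvBump; split <;> simp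

theorem pvBump_not_alpha (counts : List Int) (c : Char)
    (h : ¬ PySem.Chars.isalpha c = true) : pvBump counts c = counts := by
  unfold pvBump
  rw [if_neg]
  tauto

-- main invariant: the histogram fold moves pvDot by A's sum
theorem pvFold_inv (l : List Char) : ∀ counts : List Int, counts.length = 26 →
    (∀ c ∈ l, pvDomChar c = true) →
    pvDot (l.foldl pvBump counts)
      = pvDot counts
        + ((l.filter (fun c => PySem.Chars.isalpha c)).map
            (fun c => pvChart.getD (PySem.Chars.upperChar c) 0)).sum := by
  induction l with
  | nil => intro counts _ _; simp
  | cons c l ih =>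
    intro counts hlen hdom
    have hdc : pvDomChar c = true := hdom c (by simp)
    have hlen' : (pvBump counts c).length = 26 := by rw [pvBump_length]; exact hlen
    have hrec := ih (pvBump counts c) hlen' (fun x hx => hdom x (by simp [hx]))
    by_cases h : PySem.Chars.isalpha c = true
    · simp only [List.foldl_cons, List.filter_cons, h, if_true, List.map_cons, List.sum_cons,
        hrec, pvDot_bump counts hlen c hdc h]
      ring
    · have hb := pvBump_not_alpha counts c h
      simpa [hb, h] using hrec

-- ===== VERDICT (by name: the statement is the Claim_ definition above) =====
theorem pythagorean_value_spec : Claim_equal_pythagorean_value := by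
  intro name hdom
  unfold Spec_pythagorean_value
  rw [pvAlt_eq, pvFold_inv name.toList (List.replicate 26 0) (by simp)
    (by
      intro c hc
      have := (List.all_eq_true.mp hdom) c hc
      exact this)]
  have h0 : pvDot (List.replicate 26 0) = 0 := by decide
  rw [h0, zero_add]
  rfl
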